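-- pv_equiv track=rewrite | github.com/bashonabike/cribs-and-ladders | popRankLookupTable.py | four_card_fifteens
-- ===== SOURCE A (Python) =====
-- import itertools as it
--
-- def peg_val(card):
--     return 10 if card>10 else card
--
-- def four_card_fifteens(sorted5cards):
--     """
--     Returns the point value of 4 cards that sum to 15
--     :param sorted5cards: sorted list of 4 cards in the player's hand and the cut card
--     :return: points from four card 15's
--     """
--     points=0
--     index_combinations4 = it.combinations([0, 1, 2, 3, 4], 4)
--     for combination in list(index_combinations4):
--         card1 = sorted5cards[combination[0]]
--         value1 = peg_val(card1)
--         card2 = sorted5cards[combination[1]]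
--         value2 = peg_val(card2)
--         card3 = sorted5cards[combination[2]]
--         value3 = peg_val(card3)
--         card4 = sorted5cards[combination[3]]
--         value4=peg_val(card4)
--         if value1 + value2 + value3 + value4 == 15:
--             points += 2
--     return points
-- ===== SOURCE B (Python) =====
-- def peg_val(card):
--     return 10 if card > 10 else card
--
-- def four_card_fifteens(sorted5cards):
--     """
--     Returns the point value of 4 cards that sum to 15
--     """
--     vals = [peg_val(sorted5cards[i]) for i in range(5)]
--     total = sum(vals)
--     return 2 * sum(1 for v in vals if v == total - 15)
-- ===== Notes on version B (the rewrite author's own statement) =====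
-- stated objective: simpler
-- what changed: Replaces the enumeration of all five 4-card index combinations by one pass: a 4-card subset sums to 15 iff the omitted card's peg value equals total-15, so B sums the five peg values once and counts cards whose peg value is total-15.
import Mathlib
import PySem

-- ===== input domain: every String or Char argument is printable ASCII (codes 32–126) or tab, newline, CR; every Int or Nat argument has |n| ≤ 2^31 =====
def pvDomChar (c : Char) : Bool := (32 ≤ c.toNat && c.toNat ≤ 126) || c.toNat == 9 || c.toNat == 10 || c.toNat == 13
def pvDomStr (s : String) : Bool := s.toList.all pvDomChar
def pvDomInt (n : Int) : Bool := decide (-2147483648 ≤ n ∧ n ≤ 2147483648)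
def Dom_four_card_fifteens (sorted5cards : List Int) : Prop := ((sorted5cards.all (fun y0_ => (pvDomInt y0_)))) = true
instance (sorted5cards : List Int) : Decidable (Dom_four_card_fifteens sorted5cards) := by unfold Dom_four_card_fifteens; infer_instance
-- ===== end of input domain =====

-- B replaces the 5-combination enumeration by one pass (a 4-subset sums to 15 iff the omitted card's peg value is total-15); return-value equivalence proved for lists of length ≥ 5 (shorter lists raise IndexError in both).


-- ===== PORT A =====
def pegVal (card : Int) : Int := if card > 10 then 10 else card

-- list(it.combinations([0,1,2,3,4], 4)) in generation order
def combos4 : List (Int × Int × Int × Int) :=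
  [(0,1,2,3), (0,1,2,4), (0,1,3,4), (0,2,3,4), (1,2,3,4)]

def four_card_fifteens (sorted5cards : List Int) : Int :=
  combos4.foldl (fun points c =>
    let value1 := pegVal (PySem.List.pyGetD sorted5cards c.1 0)
    let value2 := pegVal (PySem.List.pyGetD sorted5cards c.2.1 0)
    let value3 := pegVal (PySem.List.pyGetD sorted5cards c.2.2.1 0)
    let value4 := pegVal (PySem.List.pyGetD sorted5cards c.2.2.2 0)
    if value1 + value2 + value3 + value4 = 15 then points + 2 else points) 0

-- ===== PORT B =====
def four_card_fifteens_alt (sorted5cards : List Int) : Int :=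
  let vals := (PySem.List.pyRange 0 5 1).map
    (fun i => pegVal (PySem.List.pyGetD sorted5cards i 0))
  let total := vals.foldl (· + ·) 0
  2 * (vals.foldl (fun acc v => acc + if v = total - 15 then 1 else 0) 0)

-- ===== PRECONDITION & SPEC =====
-- A (and B) raise IndexError on lists shorter than 5; Pre_ excludes exactly those.
def Pre_four_card_fifteens (sorted5cards : List Int) : Prop := 5 ≤ sorted5cards.length
instance (sorted5cards : List Int) : Decidable (Pre_four_card_fifteens sorted5cards) := by unfold Pre_four_card_fifteens; infer_instance
def pvWitness_four_card_fifteens : List Int := [1, 2, 3, 4, 5]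

def Spec_four_card_fifteens (sorted5cards : List Int) (out : Int) : Prop := out = four_card_fifteens_alt sorted5cards
instance (sorted5cards : List Int) (out : Int) : Decidable (Spec_four_card_fifteens sorted5cards out) := by unfold Spec_four_card_fifteens; infer_instance

-- ===== CLAIM (what is proved, stated in full; the proofs are below) =====
def Claim_equal_four_card_fifteens : Prop := ∀ (sorted5cards : List Int), Dom_four_card_fifteens sorted5cards → Pre_four_card_fifteens sorted5cards → Spec_four_card_fifteens sorted5cards (four_card_fifteens sorted5cards)

-- ===== LEMMAS AND PROOFS =====
-- ===== VERDICT (by name: the statement is the Claim_ definition above) =====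
set_option maxHeartbeats 2000000 in
theorem four_card_fifteens_spec : Claim_equal_four_card_fifteens := by
  intro xs _ hpre
  unfold Pre_four_card_fifteens at hpre
  match xs, hpre with
  | a :: b :: c :: d :: e :: rest, _ =>
    show four_card_fifteens _ = four_card_fifteens_alt _
    have h0 : (0:Int) ≤ (rest.length:Int) + 1 + 1 + 1 + 1 := by positivity
    have h1 : (0:Int) ≤ (rest.length:Int) + 1 + 1 + 1 := by positivity
    have h2 : (2:Int) ≤ (rest.length:Int) + 1 + 1 + 1 + 1 := by omega
    have h3 : (3:Int) ≤ (rest.length:Int) + 1 + 1 + 1 + 1 := by omega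
    have h4 : (4:Int) ≤ (rest.length:Int) + 1 + 1 + 1 + 1 := by omega
    simp [four_card_fifteens, four_card_fifteens_alt, combos4, PySem.List.pyRange,
      PySem.List.pyGetD, PySem.List.pyGet?, PySem.List.pyIdx?, List.range_succ,
      h0, h1, h2, h3, h4]
    generalize pegVal a = pa
    generalize pegVal b = pb
    generalize pegVal c = pc
    generalize pegVal d = pd
    generalize pegVal e = pe
    have h1 : (pa + pb + pc + pd = 15) = (pe = pa + pb + pc + pd + pe - 15) := by
      apply propext; omega
    have h2 : (pa + pb + pc + pe = 15) = (pd = pa + pb + pc + pd + pe - 15) := by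
      apply propext; omega
    have h3 : (pa + pb + pd + pe = 15) = (pc = pa + pb + pc + pd + pe - 15) := by
      apply propext; omega
    have h4 : (pa + pc + pd + pe = 15) = (pb = pa + pb + pc + pd + pe - 15) := by
      apply propext; omega
    have h5 : (pb + pc + pd + pe = 15) = (pa = pa + pb + pc + pd + pe - 15) := by
      apply propext; omega
    simp only [h1, h2, h3, h4, h5]
    split_ifs <;> ring
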